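-- pv_equiv track=rewrite | github.com/RainMan12345/MyStuph | graph.py | y_axis
-- ===== SOURCE A (Python) =====
-- def y_axis(lower_bound, upper_bound):
--     domain_length = upper_bound - lower_bound
--     i = 0
--     axis = ""
--     while (i<70 and i<domain_length):
--         axis+="|\n"
--         i+=1
--     return axis
-- ===== SOURCE B (Python) =====
-- def y_axis(lower_bound, upper_bound):
--     return "|\n" * max(0, min(70, upper_bound - lower_bound))
-- ===== Notes on version B (the rewrite author's own statement) =====
-- stated objective: simpler
-- what changed: Replaces the counting while-loop that appends "|\n" one step at a time with a single string multiplication by the span clamped into [0, 70].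
import Mathlib
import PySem

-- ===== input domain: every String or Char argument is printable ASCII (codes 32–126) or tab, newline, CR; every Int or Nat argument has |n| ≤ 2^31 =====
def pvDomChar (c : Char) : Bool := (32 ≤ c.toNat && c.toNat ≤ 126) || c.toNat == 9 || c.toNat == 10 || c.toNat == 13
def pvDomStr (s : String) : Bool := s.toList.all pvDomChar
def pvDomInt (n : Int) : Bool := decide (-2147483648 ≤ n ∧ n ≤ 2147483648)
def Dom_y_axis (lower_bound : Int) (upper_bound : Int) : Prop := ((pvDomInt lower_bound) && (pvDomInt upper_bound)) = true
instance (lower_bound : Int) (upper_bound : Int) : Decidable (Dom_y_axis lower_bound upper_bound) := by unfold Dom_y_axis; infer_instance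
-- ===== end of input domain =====

-- B replaces A's counting while-loop with a single clamped string multiplication (simpler).


-- ===== PORT A =====
-- the while-loop: i counts up while i < 70 and i < domain_length, appending "|\n";
-- fuel 70 is exact (the guard i < 70 stops the loop after at most 70 iterations).
-- axis is carried as List Char (wrapped with String.ofList at the end), exact for this ASCII literal.
def y_axis_loop (dl : Int) (i : Int) (axis : List Char) : Nat → List Char
  | 0 => axis
  | f + 1 =>
    if i < 70 ∧ i < dl then y_axis_loop dl (i + 1) (axis ++ ['|', '\n']) f
    else axis

def y_axis (lower_bound : Int) (upper_bound : Int) : String :=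
  String.ofList (y_axis_loop (upper_bound - lower_bound) 0 [] 70)

-- ===== PORT B =====
-- "|\n" * max(0, min(70, upper_bound - lower_bound)); str * int is flatten of replicate (exact)
def y_axis_alt (lower_bound : Int) (upper_bound : Int) : String :=
  String.ofList (List.flatten (List.replicate (max 0 (min 70 (upper_bound - lower_bound))).toNat ['|', '\n']))

-- ===== PRECONDITION & SPEC =====
def Spec_y_axis (lower_bound : Int) (upper_bound : Int) (out : String) : Prop := out = y_axis_alt lower_bound upper_bound
instance (lower_bound : Int) (upper_bound : Int) (out : String) : Decidable (Spec_y_axis lower_bound upper_bound out) := by unfold Spec_y_axis; infer_instance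

-- ===== CLAIM (what is proved, stated in full; the proofs are below) =====
def Claim_equal_y_axis : Prop := ∀ (lower_bound : Int) (upper_bound : Int), Dom_y_axis lower_bound upper_bound → Spec_y_axis lower_bound upper_bound (y_axis lower_bound upper_bound)

-- ===== LEMMAS AND PROOFS =====
theorem y_axis_loop_eq (fuel : Nat) : ∀ (dl i : Int) (axis : List Char),
    y_axis_loop dl i axis fuel
      = axis ++ List.flatten (List.replicate (min fuel (min 70 dl - i).toNat) ['|', '\n']) := by
  induction fuel with
  | zero => intro dl i axis; simp [y_axis_loop]
  | succ f ih =>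
    intro dl i axis
    by_cases h : i < 70 ∧ i < dl
    · have hlt : i < min 70 dl := by omega
      have hm : min (f + 1) (min 70 dl - i).toNat = min f (min 70 dl - (i + 1)).toNat + 1 := by
        omega
      simp only [y_axis_loop, if_pos h, ih, hm, List.replicate_succ, List.flatten_cons,
        List.append_assoc]
    · have hz : (min 70 dl - i).toNat = 0 := by omega
      simp [y_axis_loop, if_neg h, hz]

-- ===== VERDICT (by name: the statement is the Claim_ definition above) =====
theorem y_axis_spec : Claim_equal_y_axis := by
  intro lb ub _
  unfold Spec_y_axis y_axis y_axis_alt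
  rw [y_axis_loop_eq]
  have h : min 70 (min 70 (ub - lb) - 0).toNat = (max 0 (min 70 (ub - lb))).toNat := by omega
  rw [h, List.nil_append]
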